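-- pv_equiv track=rewrite | github.com/tl2cents/Wagner-Algorithms | python-poc/merge_in_place.py | merge_sorted_array_inplace
-- ===== SOURCE A (Python) =====
-- def merge_sorted_array_inplace(arr: list, ell: int):
--     n = len(arr)
--     write = 0
--     i = 0
--     mask = (1 << ell) - 1
--     group = []
--     while i < n:
--         key = arr[i] & mask
--         start = i
--         while i < n and (arr[i] & mask) == key:
--             i += 1
--         end = i
--         for i1 in range(start, end):
--             for i2 in range(i1 + 1, end):
--                 group.append((arr[i1] ^ arr[i2]) >> ell)
--         if len(group) + write <= i:
--             arr[write:write + len(group)] = group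
--             write += len(group)
--             group = []
--         else:
--             # not enough space to write in place
--             arr[write:end] = group[:end - write]
--             group = group[end - write:]
--             write = end
--     if len(group) > 0:
--         assert write == n
--         arr.extend(group)
--     else:
--         del arr[write:]
--     return arr
-- ===== SOURCE B (Python) =====
-- def merge_sorted_array_inplace(arr: list, ell: int):
--     mask = (1 << ell) - 1
--     result = []
--     xs = arr
--     while xs:
--         key = xs[0] & mask
--         k = 1
--         while k < len(xs) and xs[k] & mask == key:
--             k += 1
--         group = xs[:k]
--         result += [(a ^ b) >> ell for j, a in enumerate(group) for b in group[j + 1:]]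
--         xs = xs[k:]
--     arr[:] = result
--     return arr
-- ===== Notes on version B (the rewrite author's own statement) =====
-- stated objective: simpler
-- what changed: B drops A's in-place compaction machinery (write pointer, spill buffer `group`, the space-check branch with two slice-assignment cases, trailing extend/del) and instead scans the remaining suffix group by group, appending each group's pairwise XORs to a fresh result list that is slice-assigned back once at the end.
import Mathlib
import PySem

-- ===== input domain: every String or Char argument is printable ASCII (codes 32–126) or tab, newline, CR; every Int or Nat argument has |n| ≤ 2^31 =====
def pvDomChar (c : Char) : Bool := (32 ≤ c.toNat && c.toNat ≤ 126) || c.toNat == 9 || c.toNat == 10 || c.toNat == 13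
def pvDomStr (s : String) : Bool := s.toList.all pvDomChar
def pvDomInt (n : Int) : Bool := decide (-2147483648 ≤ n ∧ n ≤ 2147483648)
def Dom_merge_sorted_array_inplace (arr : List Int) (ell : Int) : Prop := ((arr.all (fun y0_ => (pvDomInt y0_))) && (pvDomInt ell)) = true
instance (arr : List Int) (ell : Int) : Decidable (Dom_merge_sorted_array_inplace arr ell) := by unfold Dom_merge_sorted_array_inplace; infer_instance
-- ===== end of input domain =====

-- B replaces A's in-place compaction (write pointer, spill buffer, space-check branch, extend/del)
-- by a plain scan over the remaining suffix that appends each group's pairwise XORs to a fresh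
-- result list (objective: simpler).  Side effects: A rewrites `arr` in place, B does
-- `arr[:] = result` — same object, same final content; the theorems are about the return value.

-- ===== PORT A =====
-- inner while:  while i < n and (arr[i] & mask) == key: i += 1
-- (arr.getD i 0 is exact: every read is guarded by i < n = len(arr))
def pvScanA (arr : List Int) (n : Nat) (mask key : Int) (i : Nat) : Nat :=
  if h : i < n ∧ PySem.Int.band (arr.getD i 0) mask = key then
    pvScanA arr n mask key (i + 1)
  else i
termination_by n - i
decreasing_by omega

-- termination facts for pvLoopA (cited in its decreasing_by)
theorem pvScanA_ge (arr : List Int) (n : Nat) (mask key : Int) :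
    ∀ i, i ≤ pvScanA arr n mask key i := by
  intro i
  rw [pvScanA]
  split
  · exact le_trans (Nat.le_succ i) (pvScanA_ge arr n mask key (i + 1))
  · exact le_refl i
termination_by i => n - i
decreasing_by omega

theorem pvScanA_gt (arr : List Int) (n : Nat) (mask : Int) (i : Nat) (h : i < n) :
    i < pvScanA arr n mask (PySem.Int.band (arr.getD i 0) mask) i := by
  rw [pvScanA, dif_pos (And.intro h rfl)]
  exact Nat.lt_of_lt_of_le (Nat.lt_succ_self i) (pvScanA_ge _ _ _ _ _)

-- group.append over the two nested for-loops:
--   for i1 in range(start, end): for i2 in range(i1+1, end): group.append((arr[i1]^arr[i2]) >> ell)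
def pvPairsAppendA (arr : List Int) (sh : Nat) (group : List Int) (start e : Nat) : List Int :=
  (List.range' start (e - start)).foldl (fun g1 i1 =>
    (List.range' (i1 + 1) (e - (i1 + 1))).foldl (fun g2 i2 =>
      g2 ++ [(PySem.Int.bxor (arr.getD i1 0) (arr.getD i2 0)) >>> sh]) g1) group

-- the outer while-loop of A, state (arr, group, write, i); slice assignments become take/++/drop
def pvLoopA (n : Nat) (mask : Int) (sh : Nat) (arr group : List Int) (write i : Nat) : List Int :=
  if h : i < n then
    let key := PySem.Int.band (arr.getD i 0) mask
    let e := pvScanA arr n mask key i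
    let group' := pvPairsAppendA arr sh group i e
    if group'.length + write ≤ e then
      -- arr[write:write+len(group)] = group ; write += len(group) ; group = []
      pvLoopA n mask sh (arr.take write ++ group' ++ arr.drop (write + group'.length)) []
        (write + group'.length) e
    else
      -- arr[write:end] = group[:end-write] ; group = group[end-write:] ; write = end
      pvLoopA n mask sh (arr.take write ++ group'.take (e - write) ++ arr.drop e)
        (group'.drop (e - write)) e e
  else
    -- if len(group) > 0: arr.extend(group)  (the assert write == n never fires) else: del arr[write:]
    if 0 < group.length then arr ++ group else arr.take write
termination_by n - i
decreasing_by
  · have := pvScanA_gt arr n mask i h; omega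
  · have := pvScanA_gt arr n mask i h; omega

def merge_sorted_array_inplace (arr : List Int) (ell : Int) : List Int :=
  -- mask = (1 << ell) - 1 ; 0 ≤ ell on Pre_ (Python raises ValueError on a negative shift)
  pvLoopA arr.length ((1 <<< ell.toNat) - 1) ell.toNat arr [] 0 0

-- ===== PORT B =====
-- inner while:  while k < len(xs) and xs[k] & mask == key: k += 1
def pvRunLenB (xs : List Int) (mask key : Int) (k : Nat) : Nat :=
  if h : k < xs.length ∧ PySem.Int.band (xs.getD k 0) mask = key then
    pvRunLenB xs mask key (k + 1)
  else k
termination_by xs.length - k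
decreasing_by omega

-- termination fact for pvLoopB (cited in its decreasing_by)
theorem pvRunLenB_ge (xs : List Int) (mask key : Int) :
    ∀ k, k ≤ pvRunLenB xs mask key k := by
  intro k
  rw [pvRunLenB]
  split
  · exact le_trans (Nat.le_succ k) (pvRunLenB_ge xs mask key (k + 1))
  · exact le_refl k
termination_by k => xs.length - k
decreasing_by omega

-- [(a ^ b) >> ell for j, a in enumerate(group) for b in group[j+1:]]
def pvPairsB (sh : Nat) (group : List Int) : List Int :=
  ((PySem.List.enumerate group 0).map (fun p =>
    (group.drop (p.1.toNat + 1)).map (fun b => (PySem.Int.bxor p.2 b) >>> sh))).flatten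

-- while xs: … ; result += […] ; xs = xs[k:]
def pvLoopB (mask : Int) (sh : Nat) (xs result : List Int) : List Int :=
  match xs with
  | [] => result
  | x :: t =>
    let key := PySem.Int.band x mask
    let k := pvRunLenB (x :: t) mask key 1
    pvLoopB mask sh ((x :: t).drop k) (result ++ pvPairsB sh ((x :: t).take k))
termination_by xs.length
decreasing_by
  have := pvRunLenB_ge (x :: t) mask (PySem.Int.band x mask) 1
  simp only [List.length_drop, List.length_cons]
  omega

def merge_sorted_array_inplace_alt (arr : List Int) (ell : Int) : List Int :=
  pvLoopB ((1 <<< ell.toNat) - 1) ell.toNat arr []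

-- ===== PRECONDITION & SPEC =====
-- Pre_ excludes negative ell, on which Python's `1 << ell` raises ValueError (A returns nothing there).
def Pre_merge_sorted_array_inplace (arr : List Int) (ell : Int) : Prop := 0 ≤ ell
instance (arr : List Int) (ell : Int) : Decidable (Pre_merge_sorted_array_inplace arr ell) := by
  unfold Pre_merge_sorted_array_inplace; infer_instance

def pvWitness_merge_sorted_array_inplace : List Int × Int := ([5, 1, 3, 7, 2], 1)

def Spec_merge_sorted_array_inplace (arr : List Int) (ell : Int) (out : List Int) : Prop := out = merge_sorted_array_inplace_alt arr ell
instance (arr : List Int) (ell : Int) (out : List Int) : Decidable (Spec_merge_sorted_array_inplace arr ell out) := by unfold Spec_merge_sorted_array_inplace; infer_instance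

-- ===== CLAIM (what is proved, stated in full; the proofs are below) =====
def Claim_equal_merge_sorted_array_inplace : Prop := ∀ (arr : List Int) (ell : Int), Dom_merge_sorted_array_inplace arr ell → Pre_merge_sorted_array_inplace arr ell → Spec_merge_sorted_array_inplace arr ell (merge_sorted_array_inplace arr ell)

-- ===== LEMMAS AND PROOFS =====

-- the common shape of one group's pairwise XORs
def pairsRec (f : Int → Int → Int) : List Int → List Int
  | [] => []
  | a :: t => t.map (f a) ++ pairsRec f t

theorem pvScanA_le (arr : List Int) (n : Nat) (mask key : Int) :
    ∀ i, i ≤ n → pvScanA arr n mask key i ≤ n := by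
  intro i hi
  rw [pvScanA]
  split
  · next h => exact pvScanA_le arr n mask key (i + 1) h.1
  · exact hi
termination_by i => n - i
decreasing_by omega

-- A's index scan, shifted by d, is B's run-length scan on the dropped suffix
theorem pvScanA_eq_runLen (arr : List Int) (mask key : Int) :
    ∀ d j, pvScanA arr arr.length mask key (d + j) = d + pvRunLenB (arr.drop d) mask key j := by
  intro d j
  rw [pvScanA, pvRunLenB]
  have hlen : (arr.drop d).length = arr.length - d := List.length_drop
  by_cases h : d + j < arr.length
  · have hj : j < (arr.drop d).length := by omega
    have hget : (arr.drop d).getD j 0 = arr.getD (d + j) 0 := by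
      simp [List.getD_eq_getElem?_getD, List.getElem?_drop]
    by_cases hk : PySem.Int.band (arr.getD (d + j) 0) mask = key
    · rw [dif_pos ⟨h, hk⟩, dif_pos ⟨hj, by rw [hget]; exact hk⟩]
      have := pvScanA_eq_runLen arr mask key d (j + 1)
      omega
    · rw [dif_neg (by tauto), dif_neg (by rw [hget]; tauto)]
  · rw [dif_neg (by tauto), dif_neg (by omega)]
termination_by d j => arr.length - (d + j)
decreasing_by omega

theorem map_getD_range' (arr : List Int) (g : Int → Int) :
    ∀ m a, a + m ≤ arr.length →
      (List.range' a m).map (fun t => g (arr.getD t 0)) = ((arr.drop a).take m).map g := by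
  intro m
  induction m with
  | zero => intro a _; simp
  | succ m ih =>
    intro a ha
    have hlt : a < arr.length := by omega
    rw [List.range'_succ, List.map_cons, ih (a + 1) (by omega),
      List.drop_eq_getElem_cons hlt, List.take_succ_cons, List.map_cons]
    congr 1
    simp [List.getD_eq_getElem?_getD, List.getElem?_eq_getElem hlt]

theorem pvPairsAppendA_eq (arr : List Int) (sh : Nat) :
    ∀ m i group, i + m ≤ arr.length →
      pvPairsAppendA arr sh group i (i + m) =
        group ++ pairsRec (fun a b => (PySem.Int.bxor a b) >>> sh) ((arr.drop i).take m) := by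
  intro m
  induction m with
  | zero =>
    intro i group _
    simp [pvPairsAppendA, pairsRec]
  | succ m ih =>
    intro i group h
    have hlt : i < arr.length := by omega
    unfold pvPairsAppendA
    have hms : i + (m + 1) - i = m + 1 := by omega
    rw [hms, List.range'_succ, List.foldl_cons, PySem.List.foldl_append_singleton_eq_map]
    have hinner : i + (m + 1) - (i + 1) = m := by omega
    rw [hinner]
    have hrec := ih (i + 1) (group ++ (List.range' (i + 1) m).map
      (fun i2 => (PySem.Int.bxor (arr.getD i 0) (arr.getD i2 0)) >>> sh)) (by omega)
    unfold pvPairsAppendA at hrec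
    have hnorm : i + 1 + m = i + (m + 1) := by omega
    rw [hnorm] at hrec
    rw [hinner] at hrec
    have hgd : arr.getD i 0 = arr[i] := by
      simp [List.getD_eq_getElem?_getD, List.getElem?_eq_getElem hlt]
    rw [hrec, List.drop_eq_getElem_cons hlt, List.take_succ_cons]
    simp only [pairsRec, List.append_assoc, ← hgd]
    rw [map_getD_range' arr (fun x => (PySem.Int.bxor (arr.getD i 0) x) >>> sh) m (i + 1) (by omega)]

-- B's comprehension over enumerate is pairsRec
theorem pvPairsB_enum_eq (f : Int → Int → Int) :
    ∀ (t g : List Int) (s : Nat), t = g.drop s →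
      ((PySem.List.enumerate t (s : Int)).map (fun p =>
        (g.drop (p.1.toNat + 1)).map (fun b => f p.2 b))).flatten = pairsRec f t := by
  intro t
  induction t with
  | nil => intro g s _; simp [pairsRec]
  | cons a t ih =>
    intro g s hgs
    rw [PySem.List.enumerate_cons]
    simp only [List.map_cons, List.flatten_cons]
    have h1 : ((s : Int)).toNat = s := Int.toNat_natCast s
    have hdrop : g.drop (s + 1) = t := by
      have h2 : g.drop (s + 1) = (g.drop s).drop 1 := by
        rw [List.drop_drop]
      rw [h2, ← hgs]; rfl
    have hcast : (s : Int) + 1 = ((s + 1 : Nat) : Int) := by push_cast; ring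
    rw [h1, hdrop, hcast, ih g (s + 1) hdrop.symm]
    rfl

theorem pvPairsB_eq (sh : Nat) (g : List Int) :
    pvPairsB sh g = pairsRec (fun a b => (PySem.Int.bxor a b) >>> sh) g := by
  unfold pvPairsB
  have h := pvPairsB_enum_eq (fun a b => (PySem.Int.bxor a b) >>> sh) g g 0 rfl
  simpa using h

-- the accumulator of pvLoopB factors out
theorem pvLoopB_acc (mask : Int) (sh : Nat) :
    ∀ (m : Nat) (xs res : List Int), xs.length ≤ m →
      pvLoopB mask sh xs res = res ++ pvLoopB mask sh xs [] := by
  intro m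
  induction m with
  | zero =>
    intro xs res h
    have : xs = [] := List.eq_nil_of_length_eq_zero (by omega)
    subst this; simp [pvLoopB]
  | succ m ih =>
    intro xs res h
    match xs with
    | [] => simp [pvLoopB]
    | x :: t =>
      rw [pvLoopB, pvLoopB]
      have hk := pvRunLenB_ge (x :: t) mask (PySem.Int.band x mask) 1
      have hlen : ((x :: t).drop (pvRunLenB (x :: t) mask (PySem.Int.band x mask) 1)).length ≤ m := by
        simp only [List.length_drop, List.length_cons]
        simp only [List.length_cons] at h
        omega
      rw [ih _ _ hlen]
      conv_rhs => rw [ih _ _ hlen]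
      simp

-- splice facts (Python slice assignment on lists)
theorem splice_take (l g rest : List Int) (w : Nat) (hw : w ≤ l.length) :
    (l.take w ++ g ++ rest).take (w + g.length) = l.take w ++ g := by
  have h : (l.take w ++ g).length = w + g.length := by
    simp [List.length_take]; omega
  exact List.take_left' h

theorem splice_drop (l g : List Int) (w e : Nat) (hw : w ≤ l.length)
    (he : w + g.length ≤ e) :
    (l.take w ++ g ++ l.drop (w + g.length)).drop e = l.drop e := by
  have h : (l.take w ++ g).length = w + g.length := by
    simp [List.length_take]; omega
  conv_lhs => rw [show e = (l.take w ++ g).length + (e - (w + g.length)) from by omega]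
  rw [List.drop_length_add_append, List.drop_drop]
  congr 1
  omega

theorem splice2_take (l g : List Int) (w e : Nat) (hw : w ≤ e) (hwl : w ≤ l.length)
    (hg : e - w ≤ g.length) :
    (l.take w ++ g.take (e - w) ++ l.drop e).take e = l.take w ++ g.take (e - w) := by
  have h : (l.take w ++ g.take (e - w)).length = e := by
    simp [List.length_take]; omega
  exact List.take_left' h

theorem splice2_drop (l g : List Int) (w e : Nat) (hw : w ≤ e) (hwl : w ≤ l.length)
    (hg : e - w ≤ g.length) :
    (l.take w ++ g.take (e - w) ++ l.drop e).drop e = l.drop e := by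
  have h : (l.take w ++ g.take (e - w)).length = e := by
    simp [List.length_take]; omega
  exact List.drop_left' h

-- the terminal branch of A's loop (i ≥ n)
theorem pvLoopA_base (mask : Int) (sh : Nat) (n : Nat) (i write : Nat) (arr group : List Int)
    (hlen : arr.length = n) (hin : i ≤ n) (hni : n ≤ i) (_hwi : write ≤ i)
    (hgw : group ≠ [] → write = i) :
    pvLoopA n mask sh arr group write i =
      arr.take write ++ group ++ pvLoopB mask sh (arr.drop i) [] := by
  rw [pvLoopA, dif_neg (by omega)]
  have hdrop : arr.drop i = [] := List.drop_eq_nil_of_le (by omega)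
  rw [hdrop]
  match group, hgw with
  | [], _ => simp [pvLoopB]
  | a :: g, hgw =>
    have hw : write = i := hgw (by simp)
    rw [if_pos (by simp)]
    have hlw : arr.length ≤ write := by omega
    simp [pvLoopB, List.take_of_length_le hlw]

theorem pvLoopA_eq (mask : Int) (sh : Nat) (n : Nat) :
    ∀ (m i write : Nat) (arr group : List Int), n - i ≤ m →
      arr.length = n → write ≤ i → i ≤ n → (group ≠ [] → write = i) →
      pvLoopA n mask sh arr group write i =
        arr.take write ++ group ++ pvLoopB mask sh (arr.drop i) [] := by
  intro m
  induction m with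
  | zero =>
    intro i write arr group hm hlen hwi hin hgw
    exact pvLoopA_base mask sh n i write arr group hlen hin (by omega) hwi hgw
  | succ m ih =>
    intro i write arr group hm hlen hwi hin hgw
    by_cases h : i < n
    case neg =>
      exact pvLoopA_base mask sh n i write arr group hlen hin (by omega) hwi hgw
    case pos =>
    rw [pvLoopA, dif_pos h]
    set key := PySem.Int.band (arr.getD i 0) mask with hkey
    set e := pvScanA arr n mask key i with he
    set group' := pvPairsAppendA arr sh group i e with hgroup'
    have hie : i < e := by rw [he, hkey]; exact pvScanA_gt arr n mask i h
    have hen : e ≤ n := by rw [he]; exact pvScanA_le arr n mask key i (by omega)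
    have hxne : i < arr.length := by omega
    have hrun : e = i + pvRunLenB (arr.drop i) mask key 1 := by
      have h0 : pvRunLenB (arr.drop i) mask key 0 = pvRunLenB (arr.drop i) mask key 1 := by
        rw [pvRunLenB]
        rw [dif_pos]
        refine ⟨by simp [List.length_drop]; omega, ?_⟩
        have hg : (arr.drop i).getD 0 0 = arr.getD i 0 := by
          simp [List.getD_eq_getElem?_getD, List.getElem?_drop]
        rw [hg, hkey]
      have h1 := pvScanA_eq_runLen arr mask key i 0
      rw [Nat.add_zero, hlen] at h1
      rw [he, h1, h0]
    set k := pvRunLenB (arr.drop i) mask key 1 with hk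
    have hkpos : 1 ≤ k := pvRunLenB_ge _ _ _ 1
    set f : Int → Int → Int := fun a b => (PySem.Int.bxor a b) >>> sh with hf
    have hpairs : group' = group ++ pairsRec f ((arr.drop i).take k) := by
      rw [hgroup', show e = i + k from by omega]
      exact pvPairsAppendA_eq arr sh k i group (by omega)
    -- one step of B on the suffix
    have hBstep : pvLoopB mask sh (arr.drop i) [] =
        pairsRec f ((arr.drop i).take k) ++ pvLoopB mask sh (arr.drop e) [] := by
      have hx : arr.drop i = arr[i] :: arr.drop (i + 1) := List.drop_eq_getElem_cons hxne
      have hgetD : PySem.Int.band arr[i] mask = key := by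
        rw [hkey]
        congr 1
        simp [List.getD_eq_getElem?_getD, List.getElem?_eq_getElem hxne]
      conv_lhs => rw [hx, pvLoopB]
      simp only [hgetD, ← hx, ← hk]
      have hde : (arr.drop i).drop k = arr.drop e := by
        rw [List.drop_drop]; congr 1; omega
      rw [hde, pvLoopB_acc mask sh (arr.drop e).length _ _ (le_refl _),
        List.nil_append, pvPairsB_eq]
    have hwl : write ≤ arr.length := by omega
    by_cases hb : group'.length + write ≤ e
    · rw [if_pos hb]
      set arr' := arr.take write ++ group' ++ arr.drop (write + group'.length) with harr'
      have hlen' : arr'.length = n := by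
        rw [harr']
        simp [List.length_take, List.length_drop]
        omega
      rw [ih e (write + group'.length) arr' [] (by omega) hlen' (by omega) (by omega)
        (by intro hc; exact absurd rfl hc)]
      rw [harr', splice_take arr group' _ write hwl,
        splice_drop arr group' write e hwl (by omega)]
      rw [hBstep, hpairs]
      simp [List.append_assoc]
    · rw [if_neg hb]
      have hew : e - write ≤ group'.length := by omega
      set arr'' := arr.take write ++ group'.take (e - write) ++ arr.drop e with harr''
      have hlen'' : arr''.length = n := by
        rw [harr'']
        simp [List.length_take, List.length_drop]
        omega
      rw [ih e e arr'' (group'.drop (e - write)) (by omega) hlen'' (le_refl e) (by omega)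
        (fun _ => rfl)]
      rw [harr'', splice2_take arr group' write e (by omega) hwl hew,
        splice2_drop arr group' write e (by omega) hwl hew]
      rw [hBstep, hpairs]
      simp [List.append_assoc]

-- ===== VERDICT (by name: the statement is the Claim_ definition above) =====
theorem merge_sorted_array_inplace_spec : Claim_equal_merge_sorted_array_inplace := by
  intro arr ell _ _
  unfold Spec_merge_sorted_array_inplace merge_sorted_array_inplace merge_sorted_array_inplace_alt
  rw [pvLoopA_eq _ _ arr.length arr.length 0 0 arr [] (le_refl _) rfl (le_refl 0)
    (Nat.zero_le _) (by intro hc; exact absurd rfl hc)]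
  simp
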